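-- pv_equiv track=rewrite | github.com/robertchase/txt2tufte | tufte.py | to_paragraphs
-- ===== SOURCE A (Python) =====
-- def to_paragraphs(lines):
--     """break list of lines into list of paragraphs (list of list of lines)"""
--     result = []
--     paragraph = []
--     for line in lines:
--         if line:
--             paragraph.append(line)
--         else:
--             if paragraph:  # do we have anything to add?
--                 result.append(paragraph)
--                 paragraph = []
--     if paragraph:
--         result.append(paragraph)
--
--     return result
-- ===== SOURCE B (Python) =====
-- from itertools import groupby
--
-- def to_paragraphs(lines):
--     """break list of lines into list of paragraphs (list of list of lines)"""
--     return [list(group) for key, group in groupby(lines, key=bool) if key]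
-- ===== Notes on version B (the rewrite author's own statement) =====
-- stated objective: idiomatic
-- what changed: Replaces the explicit paragraph accumulator with manual flush logic by itertools.groupby run-grouping, keeping only the truthy runs.
import Mathlib
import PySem

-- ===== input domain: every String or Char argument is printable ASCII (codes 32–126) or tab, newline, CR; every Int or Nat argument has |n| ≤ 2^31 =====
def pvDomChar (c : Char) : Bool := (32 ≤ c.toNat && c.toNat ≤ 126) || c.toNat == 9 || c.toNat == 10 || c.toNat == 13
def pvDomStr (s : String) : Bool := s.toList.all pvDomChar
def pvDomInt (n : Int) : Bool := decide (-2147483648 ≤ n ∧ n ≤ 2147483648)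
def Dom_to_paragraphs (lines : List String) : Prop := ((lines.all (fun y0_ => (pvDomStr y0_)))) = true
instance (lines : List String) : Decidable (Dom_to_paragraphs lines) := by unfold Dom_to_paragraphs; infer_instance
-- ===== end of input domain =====

-- B replaces A's explicit accumulator-and-flush loop with run-grouping (itertools.groupby): idiomatic, same O(n) cost.


-- ===== PORT A =====
-- loop over lines carrying (result, paragraph); at the end flush a nonempty paragraph
def to_paragraphs_loop (lines : List String) (result : List (List String)) (paragraph : List String) : List (List String) :=
  match lines with
  | [] => if paragraph ≠ [] then result ++ [paragraph] else result
  | line :: rest =>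
    if line ≠ "" then to_paragraphs_loop rest result (paragraph ++ [line])
    else if paragraph ≠ [] then to_paragraphs_loop rest (result ++ [paragraph]) []
    else to_paragraphs_loop rest result []

def to_paragraphs (lines : List String) : List (List String) :=
  to_paragraphs_loop lines [] []

-- ===== PORT B =====
-- groupby(lines, key=bool): peel off the maximal run of non-blank lines (a truthy group),
-- keep it, and recurse past it; blank lines (falsy groups) are skipped
def to_paragraphs_alt (lines : List String) : List (List String) :=
  match lines with
  | [] => []
  | line :: rest =>
    if line ≠ "" then
      (line :: rest.takeWhile (· ≠ "")) :: to_paragraphs_alt (rest.dropWhile (· ≠ ""))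
    else to_paragraphs_alt rest
  termination_by lines.length
  decreasing_by
    · simp only [List.length_cons]
      exact Nat.lt_succ_of_le (List.length_dropWhile_le _ _)
    · simp

-- ===== PRECONDITION & SPEC =====
def Spec_to_paragraphs (lines : List String) (out : List (List String)) : Prop := out = to_paragraphs_alt lines
instance (lines : List String) (out : List (List String)) : Decidable (Spec_to_paragraphs lines out) := by unfold Spec_to_paragraphs; infer_instance

-- ===== CLAIM (what is proved, stated in full; the proofs are below) =====
def Claim_equal_to_paragraphs : Prop := ∀ (lines : List String), Dom_to_paragraphs lines → Spec_to_paragraphs lines (to_paragraphs lines)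

-- ===== LEMMAS AND PROOFS =====
def pvGlue (paragraph : List String) (lines : List String) : List (List String) :=
  if paragraph = [] then to_paragraphs_alt lines
  else (paragraph ++ lines.takeWhile (· ≠ "")) :: to_paragraphs_alt (lines.dropWhile (· ≠ ""))

theorem pvAlt_blank (rest : List String) : to_paragraphs_alt ("" :: rest) = to_paragraphs_alt rest := by
  rw [to_paragraphs_alt]; simp

theorem pvLoop_glue (lines : List String) :
    ∀ (result : List (List String)) (paragraph : List String),
      to_paragraphs_loop lines result paragraph = result ++ pvGlue paragraph lines := by
  induction lines with
  | nil =>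
    intro result paragraph
    by_cases h : paragraph = [] <;> simp [to_paragraphs_loop, pvGlue, h, to_paragraphs_alt]
  | cons line rest ih =>
    intro result paragraph
    by_cases hl : line = ""
    · subst hl
      by_cases hp : paragraph = [] <;>
        simp [to_paragraphs_loop, pvGlue, hp, ih, pvAlt_blank, List.append_assoc]
    · rw [to_paragraphs_loop]
      simp only [hl, if_pos, ne_eq, not_false_eq_true]
      rw [ih]
      by_cases hp : paragraph = []
      · subst hp
        simp [pvGlue, hl, to_paragraphs_alt]
      · simp [pvGlue, hl, hp, List.append_assoc]

-- ===== VERDICT (by name: the statement is the Claim_ definition above) =====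
theorem to_paragraphs_spec : Claim_equal_to_paragraphs := by
  intro lines _
  show to_paragraphs lines = to_paragraphs_alt lines
  rw [to_paragraphs, pvLoop_glue]
  simp [pvGlue]
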